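-- pv_equiv track=rewrite | github.com/bmeaut/GenAiAutomationExperiments | BugFixingAnalysis/llm_bug_analysis/core/context_extraction.py | _extract_minimal_context
-- ===== SOURCE A (Python) =====
-- from typing import Dict, Any, Set, List, Tuple
--
-- def _extract_minimal_context(
--
--     buggy_code_lines: List[str],
--     changed_ranges: List[Tuple[int, int]],
--     file_path: str,
--     max_tokens: int,
-- ) -> Dict[str, str]:
--     """
--     Extract just the changed lines plus minimal context when functions are too large.
--     """
--     context_lines = set()
--     context_margin = 10
--
--     for start, end in changed_ranges:
--         for line_num in range(
--             max(1, start - context_margin),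
--             min(len(buggy_code_lines) + 1, end + context_margin + 1),
--         ):
--             context_lines.add(line_num - 1)
--
--     selected_lines = sorted(context_lines)
--     snippet = "\n".join(
--         f"{i+1:4d}: {buggy_code_lines[i]}"
--         for i in selected_lines[: max_tokens // 10]
--     )
--
--     return {f"Minimal context from {file_path}": snippet} if snippet else {}
-- ===== SOURCE B (Python) =====
-- def _extract_minimal_context(
--     buggy_code_lines,
--     changed_ranges,
--     file_path,
--     max_tokens,
-- ):
--     """Changed lines plus a 10-line margin, via sort-and-merge of the margined intervals."""
--     n = len(buggy_code_lines)
--     ivals = []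
--     for s, e in changed_ranges:
--         lo, hi = max(0, s - 11), min(n, e + 10)  # 0-based half-open clamp
--         if lo < hi:
--             ivals.append((lo, hi))
--     ivals.sort(key=lambda iv: iv[0])
--     merged = []
--     for lo, hi in ivals:
--         if merged and lo <= merged[-1][1]:
--             if hi > merged[-1][1]:
--                 merged[-1] = (merged[-1][0], hi)
--         else:
--             merged.append((lo, hi))
--     lines = [
--         f"{i+1:4d}: {buggy_code_lines[i]}"
--         for lo, hi in merged
--         for i in range(lo, hi)
--     ]
--     snippet = "\n".join(lines[: max_tokens // 10])
--     return {f"Minimal context from {file_path}": snippet} if snippet else {}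
-- ===== Notes on version B (the rewrite author's own statement) =====
-- stated objective: alternative
-- what changed: A enumerates every margined line number of every range into a set and sorts it; B clamps each range to one interval, sorts the intervals by start, merges overlapping ones into maximal disjoint intervals, and emits the line indices directly from the merged intervals, so the per-line set and the per-line sort disappear.
import Mathlib
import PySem

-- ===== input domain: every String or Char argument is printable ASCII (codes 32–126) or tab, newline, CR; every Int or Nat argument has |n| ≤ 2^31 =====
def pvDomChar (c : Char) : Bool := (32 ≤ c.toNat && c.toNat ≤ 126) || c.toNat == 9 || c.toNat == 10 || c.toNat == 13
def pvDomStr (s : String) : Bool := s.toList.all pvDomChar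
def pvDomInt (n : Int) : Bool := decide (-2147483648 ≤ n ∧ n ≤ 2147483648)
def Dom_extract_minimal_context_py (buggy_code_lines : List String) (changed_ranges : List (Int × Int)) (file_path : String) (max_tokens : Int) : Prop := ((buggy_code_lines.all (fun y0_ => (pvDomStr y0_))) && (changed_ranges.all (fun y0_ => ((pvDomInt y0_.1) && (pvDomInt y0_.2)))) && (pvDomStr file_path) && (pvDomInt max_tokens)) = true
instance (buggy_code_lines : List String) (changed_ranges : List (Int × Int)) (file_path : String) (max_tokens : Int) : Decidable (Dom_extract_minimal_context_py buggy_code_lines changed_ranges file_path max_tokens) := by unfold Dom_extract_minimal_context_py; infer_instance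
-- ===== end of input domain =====

-- B replaces A's per-line set accumulation and sort by interval arithmetic: clamp each range
-- to one interval, sort the intervals by start, merge overlaps into maximal disjoint
-- intervals, and emit the lines from those (objective: alternative).

-- ===== PORT A =====
-- f"{i+1:4d}: {buggy_code_lines[i]}" — hand-ported: right-justify str(i+1) with spaces to
-- width 4 (exact for '%4d' formatting of an int), then ": " and the line. The index i is
-- always in range here (both callers only pass indices 0 ≤ i < len), so pyGetD is exact.
def pvFormatLine (buggy_code_lines : List String) (i : Int) : String :=
  let s := PySem.Int.toStr (i + 1)
  String.ofList (List.replicate (4 - s.toList.length) ' ' ++ s.toList ++ [':', ' ']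
    ++ (PySem.List.pyGetD buggy_code_lines i "").toList)

def extract_minimal_context_py (buggy_code_lines : List String) (changed_ranges : List (Int × Int)) (file_path : String) (max_tokens : Int) : List (String × String) :=
  let context_lines : PySem.Set Int :=
    changed_ranges.foldl (fun cl se =>
      (PySem.List.pyRange (max 1 (se.1 - 10))
        (min ((buggy_code_lines.length : Int) + 1) (se.2 + 10 + 1)) 1).foldl
        (fun cl ln => PySem.Set.add cl (ln - 1)) cl) PySem.Set.empty
  let selected := PySem.List.sorted context_lines (fun x => x) false
  let snippet := PySem.Str.join "\n"
    ((PySem.List.slice selected none (some (PySem.Int.floordiv max_tokens 10))).map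
      (pvFormatLine buggy_code_lines))
  if snippet = "" then [] else [("Minimal context from " ++ file_path, snippet)]

-- ===== PORT B =====
-- the ivals-building loop: append the clamped interval when it is nonempty
def pvClamp (n : Int) (rs : List (Int × Int)) : List (Int × Int) :=
  rs.foldl (fun acc se =>
    if max 0 (se.1 - 11) < min n (se.2 + 10) then
      acc ++ [(max 0 (se.1 - 11), min n (se.2 + 10))]
    else acc) []

-- body of B's merge loop; 'merged' is kept in REVERSE (head = merged[-1]) so that the
-- Python update 'merged[-1] = (merged[-1][0], hi)' is a head replacement; reversed at the end
def pvMergeRev (racc : List (Int × Int)) (iv : Int × Int) : List (Int × Int) :=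
  match racc with
  | [] => [iv]
  | l0 :: rest =>
    if iv.1 ≤ l0.2 then
      if l0.2 < iv.2 then (l0.1, iv.2) :: rest else l0 :: rest
    else iv :: l0 :: rest

def extract_minimal_context_py_alt (buggy_code_lines : List String) (changed_ranges : List (Int × Int)) (file_path : String) (max_tokens : Int) : List (String × String) :=
  let n : Int := buggy_code_lines.length
  let ivals := pvClamp n changed_ranges
  let srt := PySem.List.sorted ivals (fun iv => iv.1) false
  let merged := (srt.foldl pvMergeRev []).reverse
  let lines := merged.flatMap (fun iv =>
    (PySem.List.pyRange iv.1 iv.2 1).map (pvFormatLine buggy_code_lines))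
  let snippet := PySem.Str.join "\n"
    (PySem.List.slice lines none (some (PySem.Int.floordiv max_tokens 10)))
  if snippet = "" then [] else [("Minimal context from " ++ file_path, snippet)]

-- ===== PRECONDITION & SPEC =====
def Spec_extract_minimal_context_py (buggy_code_lines : List String) (changed_ranges : List (Int × Int)) (file_path : String) (max_tokens : Int) (out : List (String × String)) : Prop := out = extract_minimal_context_py_alt buggy_code_lines changed_ranges file_path max_tokens
instance (buggy_code_lines : List String) (changed_ranges : List (Int × Int)) (file_path : String) (max_tokens : Int) (out : List (String × String)) : Decidable (Spec_extract_minimal_context_py buggy_code_lines changed_ranges file_path max_tokens out) := by unfold Spec_extract_minimal_context_py; infer_instance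

-- ===== CLAIM (what is proved, stated in full; the proofs are below) =====
def Claim_equal_extract_minimal_context_py : Prop := ∀ (buggy_code_lines : List String) (changed_ranges : List (Int × Int)) (file_path : String) (max_tokens : Int), Dom_extract_minimal_context_py buggy_code_lines changed_ranges file_path max_tokens → Spec_extract_minimal_context_py buggy_code_lines changed_ranges file_path max_tokens (extract_minimal_context_py buggy_code_lines changed_ranges file_path max_tokens)

-- ===== LEMMAS AND PROOFS =====

-- 'some interval of l covers line x'
def pvCovers (l : List (Int × Int)) (x : Int) : Prop := ∃ p ∈ l, p.1 ≤ x ∧ x < p.2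

-- A's accumulated set: membership description
theorem pv_memS (changed_ranges : List (Int × Int)) (n : Int) (acc : PySem.Set Int) (x : Int) :
    x ∈ changed_ranges.foldl (fun cl se =>
      (PySem.List.pyRange (max 1 (se.1 - 10)) (min (n + 1) (se.2 + 10 + 1)) 1).foldl
        (fun cl ln => PySem.Set.add cl (ln - 1)) cl) acc
    ↔ x ∈ acc ∨ ∃ se ∈ changed_ranges,
        max 1 (se.1 - 10) ≤ x + 1 ∧ x + 1 < min (n + 1) (se.2 + 10 + 1) := by
  induction changed_ranges generalizing acc with
  | nil => simp
  | cons se rest ih =>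
    rw [List.foldl_cons, ih, PySem.Set.mem_foldl_add]
    constructor
    · intro h
      rcases h with (h | ⟨ln, hln, rfl⟩) | ⟨se', hse', hb⟩
      · exact Or.inl h
      · rw [PySem.List.mem_pyRange_one] at hln
        exact Or.inr ⟨se, List.mem_cons_self, by omega⟩
      · exact Or.inr ⟨se', List.mem_cons_of_mem _ hse', hb⟩
    · intro h
      rcases h with h | ⟨se', hse', hb⟩
      · exact Or.inl (Or.inl h)
      · rcases List.mem_cons.mp hse' with rfl | hse''
        · exact Or.inl (Or.inr ⟨x + 1, by rw [PySem.List.mem_pyRange_one]; omega, by omega⟩)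
        · exact Or.inr ⟨se', hse'', hb⟩

-- A's accumulated set stays duplicate-free
theorem pv_nodupS (changed_ranges : List (Int × Int)) (n : Int) (acc : PySem.Set Int)
    (hacc : acc.Nodup) :
    (changed_ranges.foldl (fun cl se =>
      (PySem.List.pyRange (max 1 (se.1 - 10)) (min (n + 1) (se.2 + 10 + 1)) 1).foldl
        (fun cl ln => PySem.Set.add cl (ln - 1)) cl) acc).Nodup := by
  induction changed_ranges generalizing acc with
  | nil => simpa using hacc
  | cons se rest ih =>
    rw [List.foldl_cons]
    apply ih
    rw [← PySem.Set.update_map_eq_foldl_add]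
    exact PySem.Set.nodup_update _ _ hacc

-- one merge step: shape, chain, start bound and coverage
theorem pv_merge_step (racc : List (Int × Int)) (iv : Int × Int)
    (h1 : ∀ p ∈ racc, p.1 < p.2)
    (h2 : racc.Pairwise (fun a b => b.2 < a.1))
    (h3 : ∀ p ∈ racc, p.1 ≤ iv.1)
    (hiv : iv.1 < iv.2) :
    (∀ p ∈ pvMergeRev racc iv, p.1 < p.2) ∧
    (pvMergeRev racc iv).Pairwise (fun a b => b.2 < a.1) ∧
    (∀ p ∈ pvMergeRev racc iv, p.1 ≤ iv.1) ∧
    (∀ x, pvCovers (pvMergeRev racc iv) x ↔ pvCovers racc x ∨ (iv.1 ≤ x ∧ x < iv.2)) := by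
  rcases racc with _ | ⟨l0, rest⟩
  · refine ⟨by simpa [pvMergeRev] using hiv, by simp [pvMergeRev], by simp [pvMergeRev], ?_⟩
    intro x
    simp [pvMergeRev, pvCovers]
  · have hlast := h1 l0 List.mem_cons_self
    have hlast1 := h3 l0 List.mem_cons_self
    rw [List.pairwise_cons] at h2
    simp only [pvMergeRev]
    split_ifs with hle hgt
    · -- merge, extending the end to iv.2
      refine ⟨?_, ?_, ?_, ?_⟩
      · intro p hp
        rcases List.mem_cons.mp hp with rfl | hp'
        · simp only; omega
        · exact h1 p (List.mem_cons_of_mem _ hp')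
      · exact List.pairwise_cons.mpr ⟨fun b hb => h2.1 b hb, h2.2⟩
      · intro p hp
        rcases List.mem_cons.mp hp with rfl | hp'
        · simpa using hlast1
        · exact h3 p (List.mem_cons_of_mem _ hp')
      · intro x
        constructor
        · rintro ⟨p, hp, hx1, hx2⟩
          rcases List.mem_cons.mp hp with rfl | hp'
          · simp only at hx1 hx2
            by_cases hc : x < l0.2
            · exact Or.inl ⟨l0, List.mem_cons_self, hx1, hc⟩
            · exact Or.inr ⟨by omega, hx2⟩
          · exact Or.inl ⟨p, List.mem_cons_of_mem _ hp', hx1, hx2⟩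
        · rintro (⟨p, hp, hx1, hx2⟩ | ⟨hx1, hx2⟩)
          · rcases List.mem_cons.mp hp with rfl | hp'
            · exact ⟨(p.1, iv.2), List.mem_cons_self, hx1, by simp only; omega⟩
            · exact ⟨p, List.mem_cons_of_mem _ hp', hx1, hx2⟩
          · exact ⟨(l0.1, iv.2), List.mem_cons_self, by simp only; omega, by simpa using hx2⟩
    · -- iv already inside the l0 interval
      refine ⟨h1, List.pairwise_cons.mpr ⟨h2.1, h2.2⟩, h3, ?_⟩
      intro x
      constructor
      · exact Or.inl
      · rintro (h | ⟨hx1, hx2⟩)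
        · exact h
        · exact ⟨l0, List.mem_cons_self, by omega, by omega⟩
    · -- gap: push iv
      refine ⟨?_, ?_, ?_, ?_⟩
      · intro p hp
        rcases List.mem_cons.mp hp with rfl | hp'
        · exact hiv
        · exact h1 p hp'
      · refine List.pairwise_cons.mpr ⟨?_, List.pairwise_cons.mpr ⟨h2.1, h2.2⟩⟩
        intro b hb
        rcases List.mem_cons.mp hb with rfl | hb'
        · omega
        · have := h2.1 b hb'
          omega
      · intro p hp
        rcases List.mem_cons.mp hp with rfl | hp'
        · exact le_refl _
        · exact h3 p hp'
      · intro x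
        constructor
        · rintro ⟨p, hp, hx1, hx2⟩
          rcases List.mem_cons.mp hp with rfl | hp'
          · exact Or.inr ⟨hx1, hx2⟩
          · exact Or.inl ⟨p, hp', hx1, hx2⟩
        · rintro (⟨p, hp, hx1, hx2⟩ | ⟨hx1, hx2⟩)
          · exact ⟨p, List.mem_cons_of_mem _ hp, hx1, hx2⟩
          · exact ⟨iv, List.mem_cons_self, hx1, hx2⟩

-- the whole merge fold: shape, chain and coverage
theorem pv_merge_inv (l : List (Int × Int)) (racc : List (Int × Int))
    (h1 : ∀ p ∈ racc, p.1 < p.2)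
    (h2 : racc.Pairwise (fun a b => b.2 < a.1))
    (h3 : ∀ q ∈ l, ∀ p ∈ racc, p.1 ≤ q.1)
    (h4 : l.Pairwise (fun p q => p.1 ≤ q.1))
    (h5 : ∀ q ∈ l, q.1 < q.2) :
    (∀ p ∈ l.foldl pvMergeRev racc, p.1 < p.2) ∧
    (l.foldl pvMergeRev racc).Pairwise (fun a b => b.2 < a.1) ∧
    (∀ x, pvCovers (l.foldl pvMergeRev racc) x ↔ pvCovers racc x ∨ pvCovers l x) := by
  induction l generalizing racc with
  | nil => exact ⟨h1, h2, fun x => by simp [pvCovers]⟩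
  | cons iv rest ih =>
    rw [List.pairwise_cons] at h4
    obtain ⟨s1, s2, s3, s4⟩ := pv_merge_step racc iv h1 h2
      (fun p hp => h3 iv List.mem_cons_self p hp) (h5 iv List.mem_cons_self)
    obtain ⟨r1, r2, r3⟩ := ih (pvMergeRev racc iv) s1 s2
      (fun q hq p hp => le_trans (s3 p hp) (h4.1 q hq)) h4.2
      (fun q hq => h5 q (List.mem_cons_of_mem _ hq))
    rw [List.foldl_cons]
    refine ⟨r1, r2, fun x => ?_⟩
    rw [r3, s4]
    constructor
    · rintro ((h | h) | h)
      · exact Or.inl h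
      · exact Or.inr ⟨iv, List.mem_cons_self, h⟩
      · obtain ⟨p, hp, hb⟩ := h
        exact Or.inr ⟨p, List.mem_cons_of_mem _ hp, hb⟩
    · rintro (h | ⟨p, hp, hb⟩)
      · exact Or.inl (Or.inl h)
      · rcases List.mem_cons.mp hp with rfl | hp'
        · exact Or.inl (Or.inr hb)
        · exact Or.inr ⟨p, hp', hb⟩

-- the clamped-intervals loop is a filter-map
theorem pv_clamp_eq (n : Int) (rs : List (Int × Int)) :
    pvClamp n rs = (rs.filter (fun se =>
        decide (max 0 (se.1 - 11) < min n (se.2 + 10)))).map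
      (fun se => (max 0 (se.1 - 11), min n (se.2 + 10))) := by
  unfold pvClamp
  simpa using PySem.List.foldl_append_ite
    (p := fun se : Int × Int => max 0 (se.1 - 11) < min n (se.2 + 10))
    (f := fun se : Int × Int => (max 0 (se.1 - 11), min n (se.2 + 10))) rs []

-- the selected indices coincide: A's sorted set = B's merged-interval enumeration
theorem pv_selected_eq (buggy_code_lines : List String) (changed_ranges : List (Int × Int)) :
    PySem.List.sorted
      (changed_ranges.foldl (fun cl se =>
        (PySem.List.pyRange (max 1 (se.1 - 10))
          (min ((buggy_code_lines.length : Int) + 1) (se.2 + 10 + 1)) 1).foldl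
          (fun cl ln => PySem.Set.add cl (ln - 1)) cl) PySem.Set.empty)
      (fun x => x) false
    = (((PySem.List.sorted (pvClamp (buggy_code_lines.length : Int) changed_ranges)
          (fun iv => iv.1) false).foldl pvMergeRev []).reverse).flatMap
        (fun iv => PySem.List.pyRange iv.1 iv.2 1) := by
  set n : Int := (buggy_code_lines.length : Int) with hn
  set srt := PySem.List.sorted (pvClamp n changed_ranges) (fun iv => iv.1) false with hsrt
  have hsmem : ∀ p, p ∈ srt ↔ p ∈ pvClamp n changed_ranges := fun p =>
    PySem.List.mem_sorted (pvClamp n changed_ranges) (fun iv => iv.1) false p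
  have hclmem : ∀ p, p ∈ pvClamp n changed_ranges ↔
      (∃ se ∈ changed_ranges, p = (max 0 (se.1 - 11), min n (se.2 + 10))
        ∧ p.1 < p.2) := by
    intro p
    rw [pv_clamp_eq]
    simp only [List.mem_map, List.mem_filter, decide_eq_true_eq]
    constructor
    · rintro ⟨se, ⟨hse, hlt⟩, rfl⟩
      exact ⟨se, hse, rfl, hlt⟩
    · rintro ⟨se, hse, rfl, hlt⟩
      exact ⟨se, ⟨hse, by simpa using hlt⟩, rfl⟩
  obtain ⟨m1, m2, m3⟩ := pv_merge_inv srt []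
    (by simp) (by simp) (by simp)
    (PySem.List.sorted_pairwise (pvClamp n changed_ranges) (fun iv => iv.1))
    (fun q hq => by
      obtain ⟨se, _, rfl, hlt⟩ := (hclmem q).mp ((hsmem q).mp hq)
      exact hlt)
  set R := srt.foldl pvMergeRev [] with hR
  have hchain : R.reverse.Pairwise (fun a b => a.2 < b.1) := by
    rw [List.pairwise_reverse]; exact m2
  have hRmem : ∀ p, p ∈ R.reverse ↔ p ∈ R := fun p => List.mem_reverse
  have hRlt : ∀ p ∈ R.reverse, p.1 < p.2 := fun p hp => m1 p ((hRmem p).mp hp)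
  -- B's flat list is strictly increasing
  have hflat : (R.reverse.flatMap (fun iv => PySem.List.pyRange iv.1 iv.2 1)).Pairwise
      (fun a b => a < b) := by
    rw [List.pairwise_flatMap]
    refine ⟨fun p _ => PySem.List.pairwise_lt_pyRange_one p.1 p.2, ?_⟩
    refine hchain.imp ?_
    intro a b hab x hx y hy
    rw [PySem.List.mem_pyRange_one] at hx hy
    omega
  -- and it enumerates exactly the covered indices
  have hflatmem : ∀ x, x ∈ R.reverse.flatMap (fun iv => PySem.List.pyRange iv.1 iv.2 1)
      ↔ pvCovers R x := by
    intro x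
    rw [List.mem_flatMap]
    constructor
    · rintro ⟨p, hp, hx⟩
      rw [PySem.List.mem_pyRange_one] at hx
      exact ⟨p, (hRmem p).mp hp, hx⟩
    · rintro ⟨p, hp, hx⟩
      exact ⟨p, (hRmem p).mpr hp, PySem.List.mem_pyRange_one.mpr hx⟩
  apply PySem.List.sorted_eq_of_perm_of_pairwise_lt
  · rw [List.perm_ext_iff_of_nodup]
    · intro x
      rw [hflatmem, pv_memS, m3 x]
      have hnil : pvCovers ([] : List (Int × Int)) x ↔ False := by simp [pvCovers]
      have hemp : x ∈ (PySem.Set.empty : PySem.Set Int) ↔ False := by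
        simp [PySem.Set.empty]
      rw [hnil, hemp]
      simp only [false_or]
      unfold pvCovers
      constructor
      · rintro ⟨p, hp, hx1, hx2⟩
        obtain ⟨se, hse, rfl, _⟩ := (hclmem p).mp ((hsmem p).mp hp)
        dsimp only at hx1 hx2
        exact ⟨se, hse, by omega, by omega⟩
      · rintro ⟨se, hse, hb1, hb2⟩
        refine ⟨(max 0 (se.1 - 11), min n (se.2 + 10)),
          (hsmem _).mpr ((hclmem _).mpr ⟨se, hse, rfl, by dsimp only; omega⟩), ?_, ?_⟩
        · dsimp only; omega
        · dsimp only; omega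
    · exact hflat.imp (fun h => ne_of_lt h)
    · exact pv_nodupS _ _ _ List.nodup_nil
  · exact hflat

-- a slice from the front commutes with map (lengths agree)
theorem pv_slice_map {α β : Type} (f : α → β) (xs : List α) (b : Int) :
    PySem.List.slice (xs.map f) none (some b) = (PySem.List.slice xs none (some b)).map f := by
  simp [PySem.List.slice, PySem.List.clampIdx, List.map_take]

-- ===== VERDICT (by name: the statement is the Claim_ definition above) =====
theorem extract_minimal_context_py_spec : Claim_equal_extract_minimal_context_py := by
  intro buggy_code_lines changed_ranges file_path max_tokens _
  show extract_minimal_context_py _ _ _ _ = _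
  unfold extract_minimal_context_py extract_minimal_context_py_alt
  simp only
  rw [pv_selected_eq buggy_code_lines changed_ranges,
    ← List.map_flatMap, pv_slice_map]
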